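-- pv_equiv track=rewrite | github.com/discosultan/juno-core | juno/utils.py | generate_missing_spans
-- ===== SOURCE A (Python) =====
-- from typing import (Any, Awaitable, Callable, Dict, Generic, Iterable, Iterator, List, Optional,
--                     Tuple, Type, TypeVar, Union, cast)
--
-- def generate_missing_spans(start: int, end: int,
--                            existing_spans: Iterable[Tuple[int, int]]) -> Iterable[Tuple[int, int]]:
--     # Initially assume entire span missing.
--     missing_start, missing_end = start, end
--
--     # Spans are ordered by start_date. Spans do not overlap with each other.
--     for existing_start, existing_end in existing_spans:
--         if existing_start > missing_start:
--             yield missing_start, existing_start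
--         missing_start = existing_end
--
--     if missing_start < missing_end:
--         yield missing_start, missing_end
-- ===== SOURCE B (Python) =====
-- def generate_missing_spans(start, end, existing_spans):
--     # Flatten into breakpoints: start, then each span's start and end, then end.
--     points = [start]
--     for span_start, span_end in existing_spans:
--         points.append(span_start)
--         points.append(span_end)
--     points.append(end)
--     # Consume the breakpoints in consecutive pairs; each pair with a < b is a gap.
--     while points:
--         a, b = points[0], points[1]
--         if a < b:
--             yield (a, b)
--         points = points[2:]
-- ===== Notes on version B (the rewrite author's own statement) =====
-- stated objective: alternative
-- what changed: B replaces A's stateful sweep (tracking the current missing start through the loop) by building a flat breakpoint list [start, s1, e1, ..., sn, en, end] and emitting every consecutive pair (a, b) with a < b.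
import Mathlib
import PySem

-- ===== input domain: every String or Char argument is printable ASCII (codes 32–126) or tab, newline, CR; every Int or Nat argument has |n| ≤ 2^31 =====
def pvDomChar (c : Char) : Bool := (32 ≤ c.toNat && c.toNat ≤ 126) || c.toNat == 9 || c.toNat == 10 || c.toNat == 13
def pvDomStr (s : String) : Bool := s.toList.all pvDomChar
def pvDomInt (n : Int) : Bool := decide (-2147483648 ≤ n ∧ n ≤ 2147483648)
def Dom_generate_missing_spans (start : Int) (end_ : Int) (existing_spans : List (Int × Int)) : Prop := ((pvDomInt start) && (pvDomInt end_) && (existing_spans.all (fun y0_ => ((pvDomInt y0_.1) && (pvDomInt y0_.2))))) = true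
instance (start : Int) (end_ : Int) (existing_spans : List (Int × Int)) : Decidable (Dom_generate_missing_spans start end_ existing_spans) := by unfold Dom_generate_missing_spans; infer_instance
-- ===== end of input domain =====

-- B builds a flat breakpoint list [start, s1, e1, ..., sn, en, end] and emits consecutive pairs (a,b) with a < b, instead of A's stateful sweep.


-- ===== PORT A =====
-- the generator's for-loop over existing_spans, carrying missing_start; yields are appended in order
def pvGoA (missing_start : Int) (missing_end : Int) : List (Int × Int) → List (Int × Int)
  | [] => if missing_start < missing_end then [(missing_start, missing_end)] else []
  | (existing_start, existing_end) :: rest =>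
      (if existing_start > missing_start then [(missing_start, existing_start)] else []) ++
        pvGoA existing_end missing_end rest

def generate_missing_spans (start : Int) (end_ : Int) (existing_spans : List (Int × Int)) : List (Int × Int) :=
  pvGoA start end_ existing_spans

-- ===== PORT B =====
-- the 'while points' loop: take the first two breakpoints, yield if a < b, drop them
def pvPairsB : List Int → List (Int × Int)
  | a :: b :: rest => (if a < b then [(a, b)] else []) ++ pvPairsB rest
  | _ => []

def generate_missing_spans_alt (start : Int) (end_ : Int) (existing_spans : List (Int × Int)) : List (Int × Int) :=
  let points := (existing_spans.foldl (fun acc p => acc ++ [p.1, p.2]) [start]) ++ [end_]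
  pvPairsB points

-- ===== PRECONDITION & SPEC =====
def Spec_generate_missing_spans (start : Int) (end_ : Int) (existing_spans : List (Int × Int)) (out : List (Int × Int)) : Prop := out = generate_missing_spans_alt start end_ existing_spans
instance (start : Int) (end_ : Int) (existing_spans : List (Int × Int)) (out : List (Int × Int)) : Decidable (Spec_generate_missing_spans start end_ existing_spans out) := by unfold Spec_generate_missing_spans; infer_instance

-- ===== CLAIM (what is proved, stated in full; the proofs are below) =====
def Claim_equal_generate_missing_spans : Prop := ∀ (start : Int) (end_ : Int) (existing_spans : List (Int × Int)), Dom_generate_missing_spans start end_ existing_spans → Spec_generate_missing_spans start end_ existing_spans (generate_missing_spans start end_ existing_spans)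

-- ===== LEMMAS AND PROOFS =====
theorem pvFoldl_points (spans : List (Int × Int)) (acc : List Int) :
    spans.foldl (fun acc p => acc ++ [p.1, p.2]) acc = acc ++ spans.flatMap (fun p => [p.1, p.2]) := by
  induction spans generalizing acc with
  | nil => simp
  | cons p rest ih => simp [List.foldl, ih, List.flatMap_cons]

theorem pvGoA_eq_pairs (spans : List (Int × Int)) (ms me : Int) :
    pvGoA ms me spans = pvPairsB (ms :: spans.flatMap (fun p => [p.1, p.2]) ++ [me]) := by
  induction spans generalizing ms with
  | nil => simp [pvGoA, pvPairsB]
  | cons p rest ih =>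
      obtain ⟨s, e⟩ := p
      simp only [pvGoA, List.flatMap_cons, List.cons_append, pvPairsB, ih, gt_iff_lt,
        List.nil_append]

-- ===== VERDICT (by name: the statement is the Claim_ definition above) =====
theorem generate_missing_spans_spec : Claim_equal_generate_missing_spans := by
  intro start end_ spans _
  unfold Spec_generate_missing_spans generate_missing_spans generate_missing_spans_alt
  rw [pvFoldl_points, pvGoA_eq_pairs]
  simp
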